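-- pv_equiv track=rewrite | github.com/SkyTemple/skytemple | skytemple/module/dungeon/module.py | calculate_relative_weights
-- ===== SOURCE A (Python) =====
-- from functools import reduce
-- from math import gcd
-- from typing import Optional, List, Union, Iterable, Tuple, Dict, Literal, Sequence
--
-- def calculate_relative_weights(list_of_weights: List[int]) -> List[int]:
--     """Given a list of absolute spawn weights, return the relative values."""
--     weights = []
--     if len(list_of_weights) < 1:
--         return []
--     for i in range(0, len(list_of_weights)):
--         weight = list_of_weights[i]
--         if weight != 0:
--             last_nonzero = i - 1
--             while last_nonzero >= 0 and list_of_weights[last_nonzero] == 0: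
--                 last_nonzero -= 1
--             if last_nonzero != -1:
--                 weight -= list_of_weights[last_nonzero]
--         weights.append(weight)
--     weights_nonzero = [w for w in weights if w != 0]
--     weights_gcd = 1
--     if len(weights_nonzero) > 0:
--         weights_gcd = reduce(gcd, weights_nonzero)
--     return [int(w / weights_gcd) for w in weights]
-- ===== SOURCE B (Python) =====
-- from math import gcd
--
-- def calculate_relative_weights(list_of_weights):
--     """One pass: track the last nonzero value and the running gcd while building the diffs."""
--     diffs = []
--     prev = 0
--     g = None
--     for w in list_of_weights:
--         if w != 0:
--             d = w - prev
--             prev = w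
--         else:
--             d = 0
--         if d != 0:
--             g = d if g is None else gcd(g, d)
--         diffs.append(d)
--     if g is None:
--         g = 1
--     return [d // g for d in diffs]
-- ===== Notes on version B (the rewrite author's own statement) =====
-- stated objective: faster
-- what changed: B computes the diffs in one forward pass that tracks the last nonzero value and accumulates the running gcd of nonzero diffs on the fly, instead of A's per-element backwards while-scan plus separate filter and reduce passes.
import Mathlib
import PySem

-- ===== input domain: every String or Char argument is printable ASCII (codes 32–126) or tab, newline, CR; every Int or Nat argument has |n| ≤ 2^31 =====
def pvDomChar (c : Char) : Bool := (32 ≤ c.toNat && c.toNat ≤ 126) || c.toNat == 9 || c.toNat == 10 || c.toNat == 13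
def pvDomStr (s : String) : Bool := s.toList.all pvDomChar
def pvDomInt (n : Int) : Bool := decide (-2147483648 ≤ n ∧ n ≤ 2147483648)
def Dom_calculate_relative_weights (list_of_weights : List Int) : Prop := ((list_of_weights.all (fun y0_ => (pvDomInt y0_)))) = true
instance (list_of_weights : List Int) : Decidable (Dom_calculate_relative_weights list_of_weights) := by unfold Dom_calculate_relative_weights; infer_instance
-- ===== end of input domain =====

-- B replaces A's quadratic backwards scan for the previous nonzero weight by a single pass that
-- tracks the last nonzero value and the running gcd while building the diffs (same return values).


-- ===== PORT A =====
-- math.gcd on ints: nonnegative gcd of absolute values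
def pygcd (a b : Int) : Int := (Int.gcd a b : Int)

-- the inner 'while last_nonzero >= 0 and list[last_nonzero] == 0: last_nonzero -= 1';
-- argument k represents the start value last_nonzero + 1 (so 'lastNZ l i' is the loop run from i-1)
def lastNZ (l : List Int) : Nat → Int
  | 0 => -1
  | k+1 => if l.getD k 0 == 0 then lastNZ l k else (k : Int)

-- int(w / weights_gcd): Python float division then truncation; on Dom the gcd divides every
-- weight exactly and |weight| < 2^53, so it equals exact integer division, ported as Int `/`.
def calculate_relative_weights (list_of_weights : List Int) : List Int :=
  if list_of_weights.length < 1 then []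
  else
    let weights := (List.range list_of_weights.length).foldl (fun acc i =>
      let weight := list_of_weights.getD i 0
      let weight :=
        if weight != 0 then
          let last_nonzero := lastNZ list_of_weights i
          if last_nonzero != -1 then weight - list_of_weights.getD last_nonzero.toNat 0
          else weight
        else weight
      acc ++ [weight]) []
    let weights_nonzero := weights.filter (fun w => w != 0)
    let weights_gcd :=
      if weights_nonzero.length > 0 then
        match weights_nonzero with
        | [] => 1
        | x :: xs => xs.foldl pygcd x
      else 1
    weights.map (fun w => w / weights_gcd)

-- ===== PORT B =====
-- one pass building diffs, last nonzero value 'prev' and running gcd together;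
-- 'd // g' is exact here, ported as Int `/`
def bStep (st : List Int × Int × Option Int) (w : Int) : List Int × Int × Option Int :=
  let (diffs, prev, g?) := st
  let d := if w != 0 then w - prev else 0
  let prev' := if w != 0 then w else prev
  let g?' := if d != 0 then
      (match g? with
       | none => some d
       | some g => some (pygcd g d))
    else g?
  (diffs ++ [d], prev', g?')

def calculate_relative_weights_alt (list_of_weights : List Int) : List Int :=
  let st := list_of_weights.foldl bStep ([], 0, none)
  let g := st.2.2.getD 1
  st.1.map (fun d => d / g)

-- ===== PRECONDITION & SPEC =====
def Spec_calculate_relative_weights (list_of_weights : List Int) (out : List Int) : Prop := out = calculate_relative_weights_alt list_of_weights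
instance (list_of_weights : List Int) (out : List Int) : Decidable (Spec_calculate_relative_weights list_of_weights out) := by unfold Spec_calculate_relative_weights; infer_instance

-- ===== CLAIM (what is proved, stated in full; the proofs are below) =====
def Claim_equal_calculate_relative_weights : Prop := ∀ (list_of_weights : List Int), Dom_calculate_relative_weights list_of_weights → Spec_calculate_relative_weights list_of_weights (calculate_relative_weights list_of_weights)

-- ===== LEMMAS AND PROOFS =====

-- value of the last nonzero element among the first k of l (0 if none): the 'prev' of B
def pVal (l : List Int) : Nat → Int
  | 0 => 0
  | k+1 => if l.getD k 0 = 0 then pVal l k else l.getD k 0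

-- the diff produced at index i (common to both programs)
def dAt (l : List Int) (i : Nat) : Int :=
  if l.getD i 0 = 0 then 0 else l.getD i 0 - pVal l i

-- the gcd state of B after the first n diffs
def gState (l : List Int) : Nat → Option Int
  | 0 => none
  | n+1 =>
    let d := dAt l n
    if d = 0 then gState l n
    else match gState l n with
         | none => some d
         | some g => some (pygcd g d)

theorem lastNZ_pVal (l : List Int) (k : Nat) :
    (if lastNZ l k = -1 then (0:Int) else l.getD (lastNZ l k).toNat 0) = pVal l k := by
  induction k with
  | zero => simp [lastNZ, pVal]
  | succ k ih =>
    by_cases h : l.getD k 0 = 0 <;>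
      [skip; skip] <;> simp only [List.getD] at h ih ⊢ <;>
      simp [lastNZ, pVal, List.getD, h, ih]

-- A's weights list equals the indexed diffs
theorem weightsA_eq (l : List Int) (n : Nat) :
    (List.range n).foldl (fun acc i =>
      let weight := l.getD i 0
      let weight :=
        if weight != 0 then
          let last_nonzero := lastNZ l i
          if last_nonzero != -1 then weight - l.getD last_nonzero.toNat 0
          else weight
        else weight
      acc ++ [weight]) [] = (List.range n).map (dAt l) := by
  induction n with
  | zero => simp
  | succ n ih =>
    rw [List.range_succ, List.foldl_append, List.map_append, ih]
    simp only [List.foldl_cons, List.foldl_nil, List.map_cons, List.map_nil]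
    by_cases h : l.getD n 0 = 0
    · simp only [List.getD] at h
      simp [dAt, List.getD, h]
    · have hp := lastNZ_pVal l n
      simp only [List.getD] at h hp
      simp only [dAt, List.getD, h, bne_iff_ne, ne_eq, not_false_iff, if_pos, if_false]
      congr 1
      rcases eq_or_ne (lastNZ l n) (-1) with he | he <;> simp [he, ← hp]

-- B's fold invariant
theorem bFold_inv (l : List Int) (ws : List Int) (k : Nat)
    (hw : ws = l.drop k) (hk : k + ws.length = l.length) :
    ws.foldl bStep ((List.range k).map (dAt l), pVal l k, gState l k)
      = ((List.range l.length).map (dAt l), pVal l l.length, gState l l.length) := by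
  induction ws generalizing k with
  | nil =>
    simp at hk
    subst hk; rfl
  | cons a ws ih =>
    have hlt : k < l.length := by simp at hk; omega
    have ha : a = l.getD k 0 := by
      have := congrArg (fun t => t.headD 0) hw
      simpa [List.headD_eq_head?, List.head?_drop, List.getD, hlt,
        List.getElem?_eq_getElem hlt] using this
    have hw' : ws = l.drop (k+1) := by
      have := congrArg List.tail hw
      simpa [List.tail_drop] using this
    have hstep : bStep ((List.range k).map (dAt l), pVal l k, gState l k) a
        = ((List.range (k+1)).map (dAt l), pVal l (k+1), gState l (k+1)) := by
      by_cases h : l.getD k 0 = 0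
      · simp only [List.getD] at h
        simp [bStep, ha, List.getD, h, List.range_succ, dAt, pVal, gState]
      · simp only [List.getD] at h
        simp only [bStep, ha, List.getD, h, bne_iff_ne, ne_eq, not_false_iff, if_pos]
        refine congrArg₂ Prod.mk ?_ (congrArg₂ Prod.mk ?_ ?_)
        · rw [List.range_succ, List.map_append]
          simp [dAt, List.getD, h]
        · simp [pVal, List.getD, h]
        · simp only [gState, dAt, List.getD, h]
          split <;> simp_all
    rw [List.foldl_cons, hstep]
    exact ih (k+1) hw' (by simp at hk ⊢; omega)

-- gState n matches A's reduce over the nonzero diffs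
theorem gState_eq_reduce (l : List Int) (n : Nat) :
    gState l n = (match ((List.range n).map (dAt l)).filter (fun w => w != 0) with
      | [] => none
      | x :: xs => some (xs.foldl pygcd x)) := by
  induction n with
  | zero => simp [gState]
  | succ n ih =>
    rw [List.range_succ, List.map_append, List.filter_append]
    by_cases h : dAt l n = 0
    · simpa [gState, h] using ih
    · simp only [gState, h, List.map_cons, List.map_nil,
        List.filter_cons, List.filter_nil, bne_iff_ne, ne_eq, not_false_iff, if_pos]
      rw [ih]
      rcases hf : ((List.range n).map (dAt l)).filter (fun w => w != 0) with _ | ⟨x, xs⟩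
      · simp
      · simp [List.foldl_append]

-- A's gcd expression equals B's
theorem gmatch (X : List Int) :
    (if (X.filter (fun w => w != 0)).length > 0 then
        (match X.filter (fun w => w != 0) with
         | [] => (1 : Int)
         | x :: xs => xs.foldl pygcd x)
      else 1)
    = (match X.filter (fun w => w != 0) with
       | [] => (none : Option Int)
       | x :: xs => some (xs.foldl pygcd x)).getD 1 := by
  rcases hf : X.filter (fun w => w != 0) with _ | ⟨x, xs⟩ <;> simp

theorem calculate_relative_weights_eq (l : List Int) :
    calculate_relative_weights l = calculate_relative_weights_alt l := by
  have hB : calculate_relative_weights_alt l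
      = ((List.range l.length).map (dAt l)).map
          (fun d => d / (gState l l.length).getD 1) := by
    unfold calculate_relative_weights_alt
    rw [show l.foldl bStep ([], 0, none)
        = ((List.range l.length).map (dAt l), pVal l l.length, gState l l.length) from by
      simpa [pVal, gState] using bFold_inv l l 0 rfl (by simp)]
  rcases l with _ | ⟨a, l'⟩
  · simp [calculate_relative_weights, calculate_relative_weights_alt]
  · unfold calculate_relative_weights
    rw [if_neg (by simp)]
    dsimp only
    rw [hB, weightsA_eq (a :: l') (a :: l').length, gState_eq_reduce,
      gmatch ((List.range (a :: l').length).map (dAt (a :: l')))]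

-- ===== VERDICT (by name: the statement is the Claim_ definition above) =====
theorem calculate_relative_weights_spec : Claim_equal_calculate_relative_weights := by
  intro l _
  unfold Spec_calculate_relative_weights
  exact calculate_relative_weights_eq l
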